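-- pv_equiv track=rewrite | github.com/oqlos/testql | testql/interpreter/_converter.py | _detect_scenario_type
-- ===== SOURCE A (Python) =====
-- def _detect_scenario_type(commands: list[tuple[str, str]]) -> str:
--     """Heuristic to detect test type from commands."""
--     has_api = any(c == 'API' for c, _ in commands)
--     has_navigate = any(c == 'NAVIGATE' for c, _ in commands)
--     has_encoder = any(c.startswith('ENCODER_') for c, _ in commands)
--     has_select = any(c.startswith('SELECT_') for c, _ in commands)
--     has_record = any(c in ('RECORD_START', 'RECORD_STOP') for c, _ in commands)
--
--     if has_record:
--         return 'interaction'
--     if has_navigate and has_api and has_select: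
--         return 'e2e'
--     if has_encoder or has_navigate:
--         return 'gui'
--     return 'api'
-- ===== SOURCE B (Python) =====
-- def _detect_scenario_type(commands: list[tuple[str, str]]) -> str:
--     """Heuristic to detect test type from commands."""
--     has_api = has_navigate = has_encoder = has_select = False
--     for c, _ in commands:
--         if c in ('RECORD_START', 'RECORD_STOP'):
--             return 'interaction'
--         if c == 'API':
--             has_api = True
--         elif c == 'NAVIGATE':
--             has_navigate = True
--         elif c.startswith('ENCODER_'):
--             has_encoder = True
--         elif c.startswith('SELECT_'):
--             has_select = True
--     if has_navigate and has_api and has_select: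
--         return 'e2e'
--     if has_encoder or has_navigate:
--         return 'gui'
--     return 'api'
-- ===== Notes on version B (the rewrite author's own statement) =====
-- stated objective: alternative
-- what changed: Replaces five separate any(...) scans with a single pass that accumulates the four flags via mutually exclusive if/elif checks and returns 'interaction' immediately on the first RECORD_* command.
import Mathlib
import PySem

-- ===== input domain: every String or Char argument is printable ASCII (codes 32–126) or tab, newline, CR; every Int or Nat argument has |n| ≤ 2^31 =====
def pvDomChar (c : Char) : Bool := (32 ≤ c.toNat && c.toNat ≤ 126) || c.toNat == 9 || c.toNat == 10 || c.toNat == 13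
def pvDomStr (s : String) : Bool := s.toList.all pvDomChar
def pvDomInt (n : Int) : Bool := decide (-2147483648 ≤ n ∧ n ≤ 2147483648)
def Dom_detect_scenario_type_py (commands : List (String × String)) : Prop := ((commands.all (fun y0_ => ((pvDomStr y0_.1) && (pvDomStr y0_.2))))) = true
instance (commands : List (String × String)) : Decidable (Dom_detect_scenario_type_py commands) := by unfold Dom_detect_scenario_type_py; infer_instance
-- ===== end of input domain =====

-- B replaces A's five separate any(...) scans by a single one-pass loop accumulating
-- four flags (with early return on RECORD_*); same return value, alternative decomposition.


-- ===== PORT A =====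
def detect_scenario_type_py (commands : List (String × String)) : String :=
  let has_api := commands.any (fun p => p.1 == "API")
  let has_navigate := commands.any (fun p => p.1 == "NAVIGATE")
  let has_encoder := commands.any (fun p => PySem.Str.startswith p.1 "ENCODER_")
  let has_select := commands.any (fun p => PySem.Str.startswith p.1 "SELECT_")
  let has_record := commands.any (fun p => p.1 == "RECORD_START" || p.1 == "RECORD_STOP")
  if has_record then "interaction"
  else if has_navigate && has_api && has_select then "e2e"
  else if has_encoder || has_navigate then "gui"
  else "api"

-- ===== PORT B =====
def detectFinish (has_api has_navigate has_encoder has_select : Bool) : String :=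
  if has_navigate && has_api && has_select then "e2e"
  else if has_encoder || has_navigate then "gui"
  else "api"

def detectLoop : List (String × String) → Bool → Bool → Bool → Bool → String
  | [], a, n, e, s => detectFinish a n e s
  | (c, _) :: rest, a, n, e, s =>
    if c == "RECORD_START" || c == "RECORD_STOP" then "interaction"
    else if c == "API" then detectLoop rest true n e s
    else if c == "NAVIGATE" then detectLoop rest a true e s
    else if PySem.Str.startswith c "ENCODER_" then detectLoop rest a n true s
    else if PySem.Str.startswith c "SELECT_" then detectLoop rest a n e true
    else detectLoop rest a n e s

def detect_scenario_type_py_alt (commands : List (String × String)) : String :=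
  detectLoop commands false false false false

-- ===== PRECONDITION & SPEC =====
def Spec_detect_scenario_type_py (commands : List (String × String)) (out : String) : Prop := out = detect_scenario_type_py_alt commands
instance (commands : List (String × String)) (out : String) : Decidable (Spec_detect_scenario_type_py commands out) := by unfold Spec_detect_scenario_type_py; infer_instance

-- ===== CLAIM (what is proved, stated in full; the proofs are below) =====
def Claim_equal_detect_scenario_type_py : Prop := ∀ (commands : List (String × String)), Dom_detect_scenario_type_py commands → Spec_detect_scenario_type_py commands (detect_scenario_type_py commands)

-- ===== LEMMAS AND PROOFS =====

lemma prefix_excl (c p q : List Char) (h1 : ¬ p <+: q) (h2 : ¬ q <+: p)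
    (h : PySem.Chars.startswith c p = true) : PySem.Chars.startswith c q = false := by
  rw [PySem.Chars.startswith_iff] at h
  by_contra hq
  rw [Bool.not_eq_false, PySem.Chars.startswith_iff] at hq
  rcases List.prefix_or_prefix_of_prefix h hq with h0 | h0
  · exact h1 h0
  · exact h2 h0

lemma loop_eq (xs : List (String × String)) (a n e s : Bool) :
    detectLoop xs a n e s =
      if xs.any (fun p => p.1 == "RECORD_START" || p.1 == "RECORD_STOP") then "interaction"
      else detectFinish
        (a || xs.any (fun p => p.1 == "API"))
        (n || xs.any (fun p => p.1 == "NAVIGATE"))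
        (e || xs.any (fun p => PySem.Str.startswith p.1 "ENCODER_"))
        (s || xs.any (fun p => PySem.Str.startswith p.1 "SELECT_")) := by
  induction xs generalizing a n e s with
  | nil => simp [detectLoop]
  | cons hd tl ih =>
    obtain ⟨c, v⟩ := hd
    by_cases hr : (c == "RECORD_START" || c == "RECORD_STOP") = true
    · simp [detectLoop, hr]
    · by_cases hA : c = "API"
      · subst hA
        have hrf : (("API" == "RECORD_START" || "API" == "RECORD_STOP") : Bool) = false := by decide
        have e1 : PySem.Chars.startswith ['A','P','I'] ['E','N','C','O','D','E','R','_'] = false := by decide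
        have s1 : PySem.Chars.startswith ['A','P','I'] ['S','E','L','E','C','T','_'] = false := by decide
        (simp [detectLoop, ih, e1, s1, Bool.false_or]; all_goals congr 1)
      · by_cases hN : c = "NAVIGATE"
        · subst hN
          have hrf : (("NAVIGATE" == "RECORD_START" || "NAVIGATE" == "RECORD_STOP") : Bool) = false := by decide
          have e1 : PySem.Chars.startswith ['N','A','V','I','G','A','T','E'] ['E','N','C','O','D','E','R','_'] = false := by decide
          have s1 : PySem.Chars.startswith ['N','A','V','I','G','A','T','E'] ['S','E','L','E','C','T','_'] = false := by decide
          (simp [detectLoop, ih, e1, s1, Bool.false_or]; all_goals congr 1)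
        · have hrf : (c == "RECORD_START" || c == "RECORD_STOP") = false := by
            simp only [Bool.not_eq_true] at hr; exact hr
          have hcA : (c == "API") = false := by simp [hA]
          have hcN : (c == "NAVIGATE") = false := by simp [hN]
          by_cases hE : PySem.Chars.startswith c.toList ['E','N','C','O','D','E','R','_'] = true
          · have hS : PySem.Chars.startswith c.toList ['S','E','L','E','C','T','_'] = false :=
              prefix_excl _ _ _ (by decide) (by decide) hE
            (simp [detectLoop, hrf, hcA, hcN, hE, hS, ih, Bool.false_or]; all_goals congr 1; all_goals simp_all)
          · by_cases hS : PySem.Chars.startswith c.toList ['S','E','L','E','C','T','_'] = true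
            · (simp [detectLoop, hrf, hcA, hcN, hE, hS, ih, Bool.false_or]; all_goals congr 1; all_goals simp_all)
            · (simp [detectLoop, hrf, hcA, hcN, hE, hS, ih, Bool.false_or]; all_goals congr 1; all_goals simp_all)

-- ===== VERDICT (by name: the statement is the Claim_ definition above) =====
theorem detect_scenario_type_py_spec : Claim_equal_detect_scenario_type_py := by
  intro commands _
  unfold Spec_detect_scenario_type_py detect_scenario_type_py detect_scenario_type_py_alt
  rw [loop_eq, Bool.false_or, Bool.false_or, Bool.false_or, Bool.false_or]
  rfl
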